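-- pv_equiv track=rewrite | github.com/willx75/Fifa_Project | projet.py | classify_value
-- ===== SOURCE A (Python) =====
-- def classify_value(oldY):
--     Y = []
--     for oldy in oldY:
--         if oldy <= 100000:
--             y = "Classe F"
--         elif oldy > 100000 and oldy <= 500000:
--             y = "Classe E"
--         elif oldy > 500000 and oldy <= 1000000:
--             y = "Classe D"
--         elif oldy > 1000000 and oldy <= 5000000:
--             y = "Classe C"
--         elif oldy > 5000000 and oldy <= 10000000:
--             y = "Classe C+"
--         elif oldy > 10000000 and oldy <= 20000000:
--             y = "Classe B"
--         elif oldy > 20000000 and oldy <= 40000000: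
--             y = "Classe B+"
--         elif oldy > 40000000 and oldy <= 60000000:
--             y = "Classe A"
--         elif oldy > 60000000 and oldy <= 80000000:
--             y = "Classe A+"
--         elif oldy > 80000000:
--             y = "Classe S"
--         Y.append(y)
--     return (Y)
-- ===== SOURCE B (Python) =====
-- def classify_value(oldY):
--     thresholds = [100000, 500000, 1000000, 5000000, 10000000,
--                   20000000, 40000000, 60000000, 80000000]
--     labels = ["Classe F", "Classe E", "Classe D", "Classe C", "Classe C+",
--               "Classe B", "Classe B+", "Classe A", "Classe A+", "Classe S"]
--     out = []
--     for y in oldY: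
--         lo, hi = 0, len(thresholds)
--         while lo < hi:
--             mid = (lo + hi) // 2
--             if thresholds[mid] < y:
--                 lo = mid + 1
--             else:
--                 hi = mid
--         out.append(labels[lo])
--     return out
-- ===== Notes on version B (the rewrite author's own statement) =====
-- stated objective: alternative
-- what changed: Replaces the 10-branch comparison chain by a binary search (hand-written bisect_left) over a sorted threshold table paired with a label table.
import Mathlib
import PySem

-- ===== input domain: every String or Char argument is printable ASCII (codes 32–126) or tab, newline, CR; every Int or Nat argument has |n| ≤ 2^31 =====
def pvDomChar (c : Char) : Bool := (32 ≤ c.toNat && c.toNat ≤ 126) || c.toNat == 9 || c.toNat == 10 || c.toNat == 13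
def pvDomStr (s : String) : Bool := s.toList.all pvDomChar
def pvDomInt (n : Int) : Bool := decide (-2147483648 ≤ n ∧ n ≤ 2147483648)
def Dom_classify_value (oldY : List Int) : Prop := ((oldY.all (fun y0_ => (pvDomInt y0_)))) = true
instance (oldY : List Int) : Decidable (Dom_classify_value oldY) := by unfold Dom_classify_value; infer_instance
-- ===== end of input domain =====

-- B replaces A's 10-branch comparison chain by a hand-written bisect_left binary
-- search over a sorted threshold table paired with a label table (alternative).


-- ===== PORT A =====
-- the final "" default is unreachable: the last elif (oldy > 80000000) covers all
-- remaining integers, so Python's y is always assigned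
def classifyOne (oldy : Int) : String :=
  if oldy ≤ 100000 then "Classe F"
  else if 100000 < oldy ∧ oldy ≤ 500000 then "Classe E"
  else if 500000 < oldy ∧ oldy ≤ 1000000 then "Classe D"
  else if 1000000 < oldy ∧ oldy ≤ 5000000 then "Classe C"
  else if 5000000 < oldy ∧ oldy ≤ 10000000 then "Classe C+"
  else if 10000000 < oldy ∧ oldy ≤ 20000000 then "Classe B"
  else if 20000000 < oldy ∧ oldy ≤ 40000000 then "Classe B+"
  else if 40000000 < oldy ∧ oldy ≤ 60000000 then "Classe A"
  else if 60000000 < oldy ∧ oldy ≤ 80000000 then "Classe A+"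
  else if 80000000 < oldy then "Classe S"
  else ""

def classify_value (oldY : List Int) : List String :=
  oldY.foldl (fun Y oldy => Y ++ [classifyOne oldy]) []

-- ===== PORT B =====
def pvThresholds : List Int :=
  [100000, 500000, 1000000, 5000000, 10000000, 20000000, 40000000, 60000000, 80000000]
def pvLabels : List String :=
  ["Classe F", "Classe E", "Classe D", "Classe C", "Classe C+",
   "Classe B", "Classe B+", "Classe A", "Classe A+", "Classe S"]

-- Source B's while-loop; fuel = hi - lo bound (totality guard only)
def pvBlLoop (a : List Int) (x : Int) : Nat → Nat → Nat → Nat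
  | 0, lo, _ => lo
  | fuel + 1, lo, hi =>
    if lo < hi then
      let mid := (lo + hi) / 2
      if a.getD mid 0 < x then pvBlLoop a x fuel (mid + 1) hi
      else pvBlLoop a x fuel lo mid
    else lo

def classify_value_alt (oldY : List Int) : List String :=
  oldY.foldl
    (fun out y =>
      out ++ [pvLabels.getD (pvBlLoop pvThresholds y pvThresholds.length 0 pvThresholds.length) ""])
    []

-- ===== PRECONDITION & SPEC =====
def Spec_classify_value (oldY : List Int) (out : List String) : Prop := out = classify_value_alt oldY
instance (oldY : List Int) (out : List String) : Decidable (Spec_classify_value oldY out) := by unfold Spec_classify_value; infer_instance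

-- ===== CLAIM (what is proved, stated in full; the proofs are below) =====
def Claim_equal_classify_value : Prop := ∀ (oldY : List Int), Dom_classify_value oldY → Spec_classify_value oldY (classify_value oldY)

-- ===== LEMMAS AND PROOFS =====
theorem classifyOne_eq_bisect (y : Int) :
    classifyOne y = pvLabels.getD (pvBlLoop pvThresholds y pvThresholds.length 0 pvThresholds.length) "" := by
  by_cases h0 : y ≤ 100000
  · -- y in interval 0
    simp [classifyOne, pvBlLoop, pvThresholds, pvLabels,
      show ¬ ((100000:Int) < y) by omega,
      show y ≤ (100000:Int) by omega,
      show ¬ ((500000:Int) < y) by omega,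
      show y ≤ (500000:Int) by omega,
      show ¬ ((1000000:Int) < y) by omega,
      show y ≤ (1000000:Int) by omega,
      show ¬ ((5000000:Int) < y) by omega,
      show y ≤ (5000000:Int) by omega,
      show ¬ ((10000000:Int) < y) by omega,
      show y ≤ (10000000:Int) by omega,
      show ¬ ((20000000:Int) < y) by omega,
      show y ≤ (20000000:Int) by omega,
      show ¬ ((40000000:Int) < y) by omega,
      show y ≤ (40000000:Int) by omega,
      show ¬ ((60000000:Int) < y) by omega,
      show y ≤ (60000000:Int) by omega,
      show ¬ ((80000000:Int) < y) by omega,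
      show y ≤ (80000000:Int) by omega]
  by_cases h1 : y ≤ 500000
  · -- y in interval 1
    simp [classifyOne, pvBlLoop, pvThresholds, pvLabels,
      show (100000:Int) < y by omega,
      show ¬ (y ≤ (100000:Int)) by omega,
      show ¬ ((500000:Int) < y) by omega,
      show y ≤ (500000:Int) by omega,
      show ¬ ((1000000:Int) < y) by omega,
      show y ≤ (1000000:Int) by omega,
      show ¬ ((5000000:Int) < y) by omega,
      show y ≤ (5000000:Int) by omega,
      show ¬ ((10000000:Int) < y) by omega,
      show y ≤ (10000000:Int) by omega,
      show ¬ ((20000000:Int) < y) by omega,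
      show y ≤ (20000000:Int) by omega,
      show ¬ ((40000000:Int) < y) by omega,
      show y ≤ (40000000:Int) by omega,
      show ¬ ((60000000:Int) < y) by omega,
      show y ≤ (60000000:Int) by omega,
      show ¬ ((80000000:Int) < y) by omega,
      show y ≤ (80000000:Int) by omega]
  by_cases h2 : y ≤ 1000000
  · -- y in interval 2
    simp [classifyOne, pvBlLoop, pvThresholds, pvLabels,
      show (100000:Int) < y by omega,
      show ¬ (y ≤ (100000:Int)) by omega,
      show (500000:Int) < y by omega,
      show ¬ (y ≤ (500000:Int)) by omega,
      show ¬ ((1000000:Int) < y) by omega,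
      show y ≤ (1000000:Int) by omega,
      show ¬ ((5000000:Int) < y) by omega,
      show y ≤ (5000000:Int) by omega,
      show ¬ ((10000000:Int) < y) by omega,
      show y ≤ (10000000:Int) by omega,
      show ¬ ((20000000:Int) < y) by omega,
      show y ≤ (20000000:Int) by omega,
      show ¬ ((40000000:Int) < y) by omega,
      show y ≤ (40000000:Int) by omega,
      show ¬ ((60000000:Int) < y) by omega,
      show y ≤ (60000000:Int) by omega,
      show ¬ ((80000000:Int) < y) by omega,
      show y ≤ (80000000:Int) by omega]
  by_cases h3 : y ≤ 5000000
  · -- y in interval 3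
    simp [classifyOne, pvBlLoop, pvThresholds, pvLabels,
      show (100000:Int) < y by omega,
      show ¬ (y ≤ (100000:Int)) by omega,
      show (500000:Int) < y by omega,
      show ¬ (y ≤ (500000:Int)) by omega,
      show (1000000:Int) < y by omega,
      show ¬ (y ≤ (1000000:Int)) by omega,
      show ¬ ((5000000:Int) < y) by omega,
      show y ≤ (5000000:Int) by omega,
      show ¬ ((10000000:Int) < y) by omega,
      show y ≤ (10000000:Int) by omega,
      show ¬ ((20000000:Int) < y) by omega,
      show y ≤ (20000000:Int) by omega,
      show ¬ ((40000000:Int) < y) by omega,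
      show y ≤ (40000000:Int) by omega,
      show ¬ ((60000000:Int) < y) by omega,
      show y ≤ (60000000:Int) by omega,
      show ¬ ((80000000:Int) < y) by omega,
      show y ≤ (80000000:Int) by omega]
  by_cases h4 : y ≤ 10000000
  · -- y in interval 4
    simp [classifyOne, pvBlLoop, pvThresholds, pvLabels,
      show (100000:Int) < y by omega,
      show ¬ (y ≤ (100000:Int)) by omega,
      show (500000:Int) < y by omega,
      show ¬ (y ≤ (500000:Int)) by omega,
      show (1000000:Int) < y by omega,
      show ¬ (y ≤ (1000000:Int)) by omega,
      show (5000000:Int) < y by omega,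
      show ¬ (y ≤ (5000000:Int)) by omega,
      show ¬ ((10000000:Int) < y) by omega,
      show y ≤ (10000000:Int) by omega,
      show ¬ ((20000000:Int) < y) by omega,
      show y ≤ (20000000:Int) by omega,
      show ¬ ((40000000:Int) < y) by omega,
      show y ≤ (40000000:Int) by omega,
      show ¬ ((60000000:Int) < y) by omega,
      show y ≤ (60000000:Int) by omega,
      show ¬ ((80000000:Int) < y) by omega,
      show y ≤ (80000000:Int) by omega]
  by_cases h5 : y ≤ 20000000
  · -- y in interval 5
    simp [classifyOne, pvBlLoop, pvThresholds, pvLabels,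
      show (100000:Int) < y by omega,
      show ¬ (y ≤ (100000:Int)) by omega,
      show (500000:Int) < y by omega,
      show ¬ (y ≤ (500000:Int)) by omega,
      show (1000000:Int) < y by omega,
      show ¬ (y ≤ (1000000:Int)) by omega,
      show (5000000:Int) < y by omega,
      show ¬ (y ≤ (5000000:Int)) by omega,
      show (10000000:Int) < y by omega,
      show ¬ (y ≤ (10000000:Int)) by omega,
      show ¬ ((20000000:Int) < y) by omega,
      show y ≤ (20000000:Int) by omega,
      show ¬ ((40000000:Int) < y) by omega,
      show y ≤ (40000000:Int) by omega,
      show ¬ ((60000000:Int) < y) by omega,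
      show y ≤ (60000000:Int) by omega,
      show ¬ ((80000000:Int) < y) by omega,
      show y ≤ (80000000:Int) by omega]
  by_cases h6 : y ≤ 40000000
  · -- y in interval 6
    simp [classifyOne, pvBlLoop, pvThresholds, pvLabels,
      show (100000:Int) < y by omega,
      show ¬ (y ≤ (100000:Int)) by omega,
      show (500000:Int) < y by omega,
      show ¬ (y ≤ (500000:Int)) by omega,
      show (1000000:Int) < y by omega,
      show ¬ (y ≤ (1000000:Int)) by omega,
      show (5000000:Int) < y by omega,
      show ¬ (y ≤ (5000000:Int)) by omega,
      show (10000000:Int) < y by omega,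
      show ¬ (y ≤ (10000000:Int)) by omega,
      show (20000000:Int) < y by omega,
      show ¬ (y ≤ (20000000:Int)) by omega,
      show ¬ ((40000000:Int) < y) by omega,
      show y ≤ (40000000:Int) by omega,
      show ¬ ((60000000:Int) < y) by omega,
      show y ≤ (60000000:Int) by omega,
      show ¬ ((80000000:Int) < y) by omega,
      show y ≤ (80000000:Int) by omega]
  by_cases h7 : y ≤ 60000000
  · -- y in interval 7
    simp [classifyOne, pvBlLoop, pvThresholds, pvLabels,
      show (100000:Int) < y by omega,
      show ¬ (y ≤ (100000:Int)) by omega,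
      show (500000:Int) < y by omega,
      show ¬ (y ≤ (500000:Int)) by omega,
      show (1000000:Int) < y by omega,
      show ¬ (y ≤ (1000000:Int)) by omega,
      show (5000000:Int) < y by omega,
      show ¬ (y ≤ (5000000:Int)) by omega,
      show (10000000:Int) < y by omega,
      show ¬ (y ≤ (10000000:Int)) by omega,
      show (20000000:Int) < y by omega,
      show ¬ (y ≤ (20000000:Int)) by omega,
      show (40000000:Int) < y by omega,
      show ¬ (y ≤ (40000000:Int)) by omega,
      show ¬ ((60000000:Int) < y) by omega,
      show y ≤ (60000000:Int) by omega,
      show ¬ ((80000000:Int) < y) by omega,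
      show y ≤ (80000000:Int) by omega]
  by_cases h8 : y ≤ 80000000
  · -- y in interval 8
    simp [classifyOne, pvBlLoop, pvThresholds, pvLabels,
      show (100000:Int) < y by omega,
      show ¬ (y ≤ (100000:Int)) by omega,
      show (500000:Int) < y by omega,
      show ¬ (y ≤ (500000:Int)) by omega,
      show (1000000:Int) < y by omega,
      show ¬ (y ≤ (1000000:Int)) by omega,
      show (5000000:Int) < y by omega,
      show ¬ (y ≤ (5000000:Int)) by omega,
      show (10000000:Int) < y by omega,
      show ¬ (y ≤ (10000000:Int)) by omega,
      show (20000000:Int) < y by omega,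
      show ¬ (y ≤ (20000000:Int)) by omega,
      show (40000000:Int) < y by omega,
      show ¬ (y ≤ (40000000:Int)) by omega,
      show (60000000:Int) < y by omega,
      show ¬ (y ≤ (60000000:Int)) by omega,
      show ¬ ((80000000:Int) < y) by omega,
      show y ≤ (80000000:Int) by omega]
  simp [classifyOne, pvBlLoop, pvThresholds, pvLabels,
      show (100000:Int) < y by omega,
      show ¬ (y ≤ (100000:Int)) by omega,
      show (500000:Int) < y by omega,
      show ¬ (y ≤ (500000:Int)) by omega,
      show (1000000:Int) < y by omega,
      show ¬ (y ≤ (1000000:Int)) by omega,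
      show (5000000:Int) < y by omega,
      show ¬ (y ≤ (5000000:Int)) by omega,
      show (10000000:Int) < y by omega,
      show ¬ (y ≤ (10000000:Int)) by omega,
      show (20000000:Int) < y by omega,
      show ¬ (y ≤ (20000000:Int)) by omega,
      show (40000000:Int) < y by omega,
      show ¬ (y ≤ (40000000:Int)) by omega,
      show (60000000:Int) < y by omega,
      show ¬ (y ≤ (60000000:Int)) by omega,
      show (80000000:Int) < y by omega,
      show ¬ (y ≤ (80000000:Int)) by omega]

theorem foldl_eq (oldY : List Int) (acc : List String) :
    oldY.foldl (fun Y oldy => Y ++ [classifyOne oldy]) acc =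
    oldY.foldl
      (fun out y =>
        out ++ [pvLabels.getD (pvBlLoop pvThresholds y pvThresholds.length 0 pvThresholds.length) ""])
      acc := by
  simp only [classifyOne_eq_bisect]

-- ===== VERDICT (by name: the statement is the Claim_ definition above) =====
theorem classify_value_spec : Claim_equal_classify_value := by
  intro oldY _
  unfold Spec_classify_value classify_value classify_value_alt
  exact foldl_eq oldY []
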